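-- pv_equiv track=rewrite | github.com/miliar/Code_Jam_Webscraper | solutions_python/Problem_199/932.py | flip_some
-- ===== SOURCE A (Python) =====
-- def of_list(l): return ''.join(l)
--
-- def flip(c):
--     if c == '+': return '-'
--     elif c == '-': return '+'
--     else: raise ValueError
--
-- def flip_some(x, k, i):
--     l=list(x)
--     ret=[]
--     for j in range(len(l)):
--         if j >= i and j < i+k:
--             ret.append(flip(l[j]))
--         else:
--             ret.append(l[j])
--     return of_list(ret)
-- ===== SOURCE B (Python) =====
-- def flip(c):
--     if c == '+': return '-'
--     elif c == '-': return '+'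
--     else: raise ValueError
--
-- def flip_some(x, k, i):
--     a = max(0, i)
--     b = min(len(x), i + k)
--     if a >= b:
--         return x
--     return x[:a] + ''.join(flip(c) for c in x[a:b]) + x[b:]
-- ===== Notes on version B (the rewrite author's own statement) =====
-- stated objective: simpler
-- what changed: B clamps the window to [max(0,i), min(len(x), i+k)) and rebuilds the string as prefix + flipped slice + suffix, instead of scanning every index with an in-window branch.
import Mathlib
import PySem

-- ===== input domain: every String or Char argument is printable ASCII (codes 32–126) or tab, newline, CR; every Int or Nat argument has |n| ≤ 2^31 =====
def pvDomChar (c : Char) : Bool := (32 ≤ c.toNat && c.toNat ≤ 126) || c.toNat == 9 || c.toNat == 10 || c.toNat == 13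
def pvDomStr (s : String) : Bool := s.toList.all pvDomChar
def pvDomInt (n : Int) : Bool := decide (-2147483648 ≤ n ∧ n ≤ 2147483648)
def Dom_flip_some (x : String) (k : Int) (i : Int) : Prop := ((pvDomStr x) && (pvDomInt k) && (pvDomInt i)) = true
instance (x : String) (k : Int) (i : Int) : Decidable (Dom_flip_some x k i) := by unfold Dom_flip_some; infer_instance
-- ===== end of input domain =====

-- B rebuilds the string as prefix ++ flipped clamped window ++ suffix instead of A's
-- per-index scan with an in-window branch; objective: simpler.


-- ===== PORT A =====
-- flip: returns none where the Python raises ValueError (excluded by Pre_)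
def flipA? (c : Char) : Option Char :=
  if c = '+' then some '-' else if c = '-' then some '+' else none

-- the for-loop over range(len(l)): j is the running index; none = the loop raised
def goA (i k : Int) : List Char → Int → Option (List Char)
  | [], _ => some []
  | c :: cs, j =>
    match (if j ≥ i ∧ j < i + k then flipA? c else some c), goA i k cs (j + 1) with
    | some h, some t => some (h :: t)
    | _, _ => none

def flip_some (x : String) (k : Int) (i : Int) : String :=
  match goA i k x.toList 0 with
  | some l => String.ofList l
  | none => ""      -- unreachable under Pre_ (Python raises ValueError here)

-- ===== PORT B =====
def flipB? (c : Char) : Option Char :=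
  if c = '+' then some '-' else if c = '-' then some '+' else none

def flip_some_alt (x : String) (k : Int) (i : Int) : String :=
  let l := x.toList
  let a : Int := max 0 i
  let b : Int := min (l.length : Int) (i + k)
  if a ≥ b then x
  else
    -- x[:a], x[a:b], x[b:] with 0 ≤ a ≤ b ≤ len: exact as take/drop
    match ((l.drop a.toNat).take (b - a).toNat).mapM flipB? with
    | some mid => String.ofList (l.take a.toNat ++ mid ++ l.drop b.toNat)
    | none => ""      -- unreachable under Pre_ (Python raises ValueError here)

-- ===== PRECONDITION & SPEC =====
-- Pre_ excludes exactly the inputs on which A raises ValueError: some character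
-- inside the window [i, i+k) is neither '+' nor '-'.
def Pre_flip_some (x : String) (k : Int) (i : Int) : Prop :=
  ∀ p : Nat, p < x.toList.length → i ≤ (p : Int) → (p : Int) < i + k →
    x.toList[p]! = '+' ∨ x.toList[p]! = '-'
instance (x : String) (k : Int) (i : Int) : Decidable (Pre_flip_some x k i) := by
  unfold Pre_flip_some; infer_instance

def pvWitness_flip_some : String × Int × Int := ("a+--+b", 4, 1)

def Spec_flip_some (x : String) (k : Int) (i : Int) (out : String) : Prop := out = flip_some_alt x k i
instance (x : String) (k : Int) (i : Int) (out : String) : Decidable (Spec_flip_some x k i out) := by unfold Spec_flip_some; infer_instance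

-- ===== CLAIM (what is proved, stated in full; the proofs are below) =====
def Claim_equal_flip_some : Prop := ∀ (x : String) (k : Int) (i : Int), Dom_flip_some x k i → Pre_flip_some x k i → Spec_flip_some x k i (flip_some x k i)

-- ===== LEMMAS AND PROOFS =====

-- total flip, used only in proofs as the common value of both ports under Pre_
def flipT (c : Char) : Char := if c = '+' then '-' else if c = '-' then '+' else c

def mapWin (i k : Int) : Int → List Char → List Char
  | _, [] => []
  | j, c :: cs => (if i ≤ j ∧ j < i + k then flipT c else c) :: mapWin i k (j + 1) cs

theorem flipA?_eq (c : Char) (h : c = '+' ∨ c = '-') : flipA? c = some (flipT c) := by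
  rcases h with h | h <;> simp [flipA?, flipT, h]

theorem goA_eq (i k : Int) (l : List Char) (j : Int)
    (h : ∀ p : Nat, p < l.length → i ≤ j + p → j + (p : Int) < i + k → l[p]! = '+' ∨ l[p]! = '-') :
    goA i k l j = some (mapWin i k j l) := by
  induction l generalizing j with
  | nil => simp [goA, mapWin]
  | cons c cs ih =>
    have hc : i ≤ j → j < i + k → c = '+' ∨ c = '-' := by
      intro h1 h2
      have := h 0 (by simp) (by simpa using h1) (by simpa using h2)
      simpa using this
    have ht : goA i k cs (j + 1) = some (mapWin i k (j + 1) cs) := by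
      apply ih
      intro p hp h1 h2
      have := h (p + 1) (by simpa using Nat.succ_lt_succ hp)
        (by push_cast at h1 ⊢; omega) (by push_cast at h2 ⊢; omega)
      simpa using this
    by_cases hw : j ≥ i ∧ j < i + k
    · have hf := flipA?_eq c (hc hw.1 hw.2)
      simp [goA, mapWin, hw, ht, hf]
    · simp [goA, mapWin, hw, ht]

-- mapWin is the identity when the whole list lies outside the window
theorem mapWin_id (i k : Int) (l : List Char) (j : Int)
    (h : ∀ p : Nat, p < l.length → ¬ (i ≤ j + p ∧ j + (p : Int) < i + k)) :
    mapWin i k j l = l := by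
  induction l generalizing j with
  | nil => simp [mapWin]
  | cons c cs ih =>
    have h0 : ¬ (i ≤ j ∧ j < i + k) := by
      have := h 0 (by simp); simpa using this
    have ht : mapWin i k (j + 1) cs = cs := by
      apply ih; intro p hp
      have := h (p + 1) (by simpa using Nat.succ_lt_succ hp)
      push_cast at this ⊢; intro hcon; exact this ⟨by omega, by omega⟩
    simp [mapWin, h0, ht]

-- mapWin maps flipT when the whole list lies inside the window
theorem mapWin_all (i k : Int) (l : List Char) (j : Int)
    (h : ∀ p : Nat, p < l.length → i ≤ j + p ∧ j + (p : Int) < i + k) :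
    mapWin i k j l = l.map flipT := by
  induction l generalizing j with
  | nil => simp [mapWin]
  | cons c cs ih =>
    have h0 : i ≤ j ∧ j < i + k := by have := h 0 (by simp); simpa using this
    have ht : mapWin i k (j + 1) cs = cs.map flipT := by
      apply ih; intro p hp
      have := h (p + 1) (by simpa using Nat.succ_lt_succ hp)
      push_cast at this ⊢; exact ⟨by omega, by omega⟩
    simp [mapWin, h0, ht]

theorem mapWin_append (i k : Int) (l1 l2 : List Char) (j : Int) :
    mapWin i k j (l1 ++ l2) = mapWin i k j l1 ++ mapWin i k (j + l1.length) l2 := by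
  induction l1 generalizing j with
  | nil => simp [mapWin]
  | cons c cs ih =>
    simp only [List.cons_append, mapWin, ih, List.length_cons]
    congr 2
    push_cast
    ring_nf

theorem mapM_flipB?_eq (l : List Char) (h : ∀ c ∈ l, c = '+' ∨ c = '-') :
    l.mapM flipB? = some (l.map flipT) := by
  induction l with
  | nil => rfl
  | cons c cs ih =>
    have hc : flipB? c = some (flipT c) := by
      rcases h c (by simp) with h' | h' <;> simp [flipB?, flipT, h']
    rw [List.mapM_cons, hc, ih (fun c hc => h c (by simp [hc]))]
    rfl

theorem mem_window {l : List Char} {aN bN : Nat} {c : Char}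
    (h : c ∈ (l.drop aN).take (bN - aN)) :
    ∃ p, aN ≤ p ∧ p < bN ∧ ∃ hp : p < l.length, l[p] = c := by
  obtain ⟨q, hq, hcq⟩ := List.mem_iff_getElem.mp h
  have hq' : q < bN - aN ∧ q < l.length - aN := by
    simpa [List.length_take, List.length_drop, Nat.lt_min] using hq
  refine ⟨aN + q, Nat.le_add_right _ _, by omega, by omega, ?_⟩
  simpa [List.getElem_take, List.getElem_drop] using hcq

theorem take_drop_window (l : List Char) (a b : Nat) (hab : a ≤ b) (hb : b ≤ l.length) :
    l = l.take a ++ ((l.drop a).take (b - a) ++ l.drop b) := by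
  have h2 : (l.drop a).drop (b - a) = l.drop b := by
    rw [List.drop_drop]; congr 1; omega
  calc l = l.take a ++ l.drop a := (List.take_append_drop a l).symm
    _ = l.take a ++ ((l.drop a).take (b - a) ++ (l.drop a).drop (b - a)) := by
          conv_rhs => rw [List.take_append_drop]
    _ = l.take a ++ ((l.drop a).take (b - a) ++ l.drop b) := by rw [h2]

-- ===== VERDICT (by name: the statement is the Claim_ definition above) =====
theorem flip_some_spec : Claim_equal_flip_some := by
  intro x k i _ hpre
  unfold Spec_flip_some
  unfold Pre_flip_some at hpre
  have hgo : goA i k x.toList 0 = some (mapWin i k 0 x.toList) := by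
    apply goA_eq
    intro p hp h1 h2
    exact hpre p hp (by simpa using h1) (by simpa using h2)
  by_cases hab : max 0 i ≥ min ((x.toList.length : Int)) (i + k)
  · have hid : mapWin i k 0 x.toList = x.toList := by
      apply mapWin_id
      intro p hp hcon
      have hpn : (p : Int) < (x.toList.length : Int) := by exact_mod_cast hp
      obtain ⟨h1, h2⟩ := hcon
      simp only [zero_add] at h1 h2
      omega
    show flip_some x k i = flip_some_alt x k i
    rw [flip_some, flip_some_alt]
    simp only [hgo, hid, ge_iff_le, if_pos hab, String.ofList_toList]
  · push_neg at hab
    set n := x.toList.length with hn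
    set l := x.toList with hl
    set a : Int := max 0 i with ha
    set b : Int := min ((n : Int)) (i + k) with hb
    have ha0 : 0 ≤ a := le_max_left _ _
    have hia : i ≤ a := le_max_right _ _
    have hbik : b ≤ i + k := min_le_right _ _
    have hbn : b ≤ (n : Int) := min_le_left _ _
    have haN : (a.toNat : Int) = a := Int.toNat_of_nonneg ha0
    have hbN : (b.toNat : Int) = b := Int.toNat_of_nonneg (le_of_lt (lt_of_le_of_lt ha0 hab))
    set aN := a.toNat with haNd
    set bN := b.toNat with hbNd
    have habN : aN ≤ bN := by omega
    have hbnN : bN ≤ n := by omega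
    set pre := l.take aN with hpredef
    set mid := (l.drop aN).take (bN - aN) with hmiddef
    set suf := l.drop bN with hsufdef
    have hdec : l = pre ++ (mid ++ suf) := take_drop_window l aN bN habN hbnN
    have hprelen : pre.length = aN := by
      rw [hpredef, List.length_take]; omega
    have hmidlen : mid.length = bN - aN := by
      rw [hmiddef, List.length_take, List.length_drop]; omega
    have hmemb : ∀ c ∈ mid, c = '+' ∨ c = '-' := by
      intro c hc
      rw [hmiddef] at hc
      obtain ⟨p, hap, hpb, hplen, hcp⟩ := mem_window hc
      have hplen' : p < n := by omega
      have hget : l[p]! = l[p]'hplen := getElem!_pos l p hplen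
      have := hpre p hplen' (by push_cast; omega) (by push_cast; omega)
      rw [hget, hcp] at this
      exact this
    have hApre : mapWin i k 0 pre = pre := by
      apply mapWin_id
      intro p hp hcon
      obtain ⟨h1, h2⟩ := hcon
      simp only [zero_add] at h1 h2
      rw [hprelen] at hp
      have : (p : Int) < a := by omega
      omega
    have hAmid : mapWin i k (0 + (pre.length : Int)) mid = mid.map flipT := by
      apply mapWin_all
      intro p hp
      rw [hmidlen] at hp
      rw [hprelen]
      constructor
      · push_cast; omega
      · push_cast; omega
    have hAsuf : mapWin i k (0 + (pre.length : Int) + (mid.length : Int)) suf = suf := by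
      apply mapWin_id
      intro p hp hcon
      obtain ⟨h1, h2⟩ := hcon
      rw [hprelen] at *
      rw [hmidlen] at *
      have hsl : suf.length = n - bN := by rw [hsufdef, List.length_drop]
      rw [hsl] at hp
      push_cast at h1 h2
      omega
    have hA : mapWin i k 0 l = pre ++ (mid.map flipT ++ suf) := by
      conv_lhs => rw [hdec]
      rw [mapWin_append, mapWin_append, hApre, hAmid, hAsuf]
    have hmapM : mid.mapM flipB? = some (mid.map flipT) := mapM_flipB?_eq mid hmemb
    have hba : (b - a).toNat = bN - aN := by omega
    have hnab : ¬ (a ≥ b) := not_le.mpr hab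
    show flip_some x k i = flip_some_alt x k i
    rw [flip_some, flip_some_alt]
    simp only [← hl, ← hn, ← ha, ← hb, ← haNd, ← hbNd, hgo, hA, hba, ← hmiddef, hmapM,
      ge_iff_le, if_neg hnab, ← hpredef, ← hsufdef]
    rw [List.append_assoc]
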